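-- pv_equiv track=rewrite | github.com/AnVales/Gene-networks | e.coli_regulatory_network_script.py | contarFFL
-- ===== SOURCE A (Python) =====
-- def contarFFL(dic):
--     contador = 0
--     for key in dic:
--         for a, b in dic[key].keys():
--             if a == b:
--                 continue
--             for c, d in dic[b].keys():
--                 if b != c or c==d or (c == a):
--                     continue
--                 if (a, d) in dic[a]:
--                     contador+=1
--
--
--     return contador
-- ===== SOURCE B (Python) =====
-- def contarFFL(dic):
--     # successor index: succ[n] = targets y of edge keys (n, y) stored under node n
--     succ = {n: {y for (x, y) in edges.keys() if x == n} for n, edges in dic.items()}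
--     total = 0
--     for edges in dic.values():
--         for a, b in edges.keys():
--             if a == b:
--                 continue
--             sb = succ[b] - {b}
--             if sb:
--                 total += len(sb & succ[a])
--     return total
-- ===== Notes on version B (the rewrite author's own statement) =====
-- stated objective: alternative
-- what changed: B precomputes a successor-set index succ[n] once per node and counts FFLs per edge (a,b) as |(succ[b]-{b}) & succ[a]| via set difference/intersection, replacing A's inner Python-level scan of dic[b] with per-candidate dict-membership probes.
import Mathlib
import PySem

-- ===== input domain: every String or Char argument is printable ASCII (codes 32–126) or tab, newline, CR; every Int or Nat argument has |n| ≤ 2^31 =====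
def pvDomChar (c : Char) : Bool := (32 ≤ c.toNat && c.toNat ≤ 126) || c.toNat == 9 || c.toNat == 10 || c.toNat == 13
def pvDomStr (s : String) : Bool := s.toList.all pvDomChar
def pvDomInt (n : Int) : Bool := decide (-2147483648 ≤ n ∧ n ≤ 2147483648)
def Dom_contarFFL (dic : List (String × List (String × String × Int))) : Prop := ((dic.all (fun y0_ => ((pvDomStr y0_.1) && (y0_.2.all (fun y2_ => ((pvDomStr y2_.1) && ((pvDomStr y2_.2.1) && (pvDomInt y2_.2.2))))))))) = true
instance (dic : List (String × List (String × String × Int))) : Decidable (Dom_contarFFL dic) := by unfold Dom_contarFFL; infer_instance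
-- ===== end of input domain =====

-- B builds a successor-set index once and counts per edge by set difference/intersection instead of A's
-- inner scan of dic[b]; same asymptotics, different shape.

-- ===== PORT A =====
-- the distinct (a, b) key pairs of an inner dict, in insertion order (iterating `dict.keys()`)
def pvEdgeKeys (es : List (String × String × Int)) : List (String × String) :=
  PySem.Set.ofList (es.map (fun e => (e.1, e.2.1)))

def contarFFL (dic : List (String × List (String × String × Int))) : Int :=
  let d := PySem.Dict.ofList dic
  d.keys.foldl (fun contador key =>
    (pvEdgeKeys (d.getD key [])).foldl (fun contador ab =>
      if ab.1 = ab.2 then contador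
      else
        (pvEdgeKeys (d.getD ab.2 [])).foldl (fun contador cd =>
          if ab.2 ≠ cd.1 ∨ cd.1 = cd.2 ∨ cd.1 = ab.1 then contador
          else if (d.getD ab.1 []).any (fun e => e.1 == ab.1 && e.2.1 == cd.2) then contador + 1
          else contador) contador) contador) 0

-- ===== PORT B =====
-- succ[n] = {y for (x, y) in es.keys() if x == n}
def pvSucc (n : String) (es : List (String × String × Int)) : List String :=
  PySem.Set.ofList ((es.filter (fun e => e.1 == n)).map (fun e => e.2.1))

def contarFFL_alt (dic : List (String × List (String × String × Int))) : Int :=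
  let d := PySem.Dict.ofList dic
  let succ : PySem.Dict String (List String) :=
    PySem.Dict.mk (d.items.map (fun p => (p.1, pvSucc p.1 p.2)))
  d.values.foldl (fun total es =>
    (pvEdgeKeys es).foldl (fun total ab =>
      if ab.1 = ab.2 then total
      else
        let sb := PySem.Set.diff (succ.getD ab.2 []) [ab.2]
        if sb.isEmpty then total
        else total + PySem.Set.len (PySem.Set.inter sb (succ.getD ab.1 []))) total) 0

-- ===== PRECONDITION & SPEC =====
-- Pre_ excludes exactly the inputs where the Python A raises KeyError: some edge key (a, b) with a ≠ b
-- has b absent from the dict, or has a qualifying middle edge (b, d) (d ≠ b, b ≠ a) while a is absent.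
def Pre_contarFFL (dic : List (String × List (String × String × Int))) : Prop :=
  ∀ p ∈ (PySem.Dict.ofList dic).items, ∀ e ∈ p.2, e.1 ≠ e.2.1 →
    (PySem.Dict.ofList dic).contains e.2.1 = true ∧
    ((∃ f ∈ (PySem.Dict.ofList dic).getD e.2.1 [], f.1 = e.2.1 ∧ f.1 ≠ f.2.1 ∧ f.1 ≠ e.1) →
      (PySem.Dict.ofList dic).contains e.1 = true)
instance (dic : List (String × List (String × String × Int))) : Decidable (Pre_contarFFL dic) := by unfold Pre_contarFFL; infer_instance

def pvWitness_contarFFL : (List (String × List (String × String × Int))) :=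
  [("x", [("x", "y", 1)]), ("y", [("y", "z", 2)]), ("z", [])]

def Spec_contarFFL (dic : List (String × List (String × String × Int))) (out : Int) : Prop := out = contarFFL_alt dic
instance (dic : List (String × List (String × String × Int))) (out : Int) : Decidable (Spec_contarFFL dic out) := by unfold Spec_contarFFL; infer_instance

-- ===== CLAIM (what is proved, stated in full; the proofs are below) =====
def Claim_equal_contarFFL : Prop := ∀ (dic : List (String × List (String × String × Int))), Dom_contarFFL dic → Pre_contarFFL dic → Spec_contarFFL dic (contarFFL dic)

-- ===== LEMMAS AND PROOFS =====

theorem pv_discard_of_not_mem {α : Type} [BEq α] [LawfulBEq α] (s : PySem.Set α) (x : α)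
    (hx : x ∉ s) : PySem.Set.discard s x = s := by
  simp only [PySem.Set.discard]
  apply List.filter_eq_self.mpr
  intro y hy
  simp only [Bool.not_eq_eq_eq_not, Bool.not_true, beq_eq_false_iff_ne, ne_eq]
  exact fun h => hx (h ▸ hy)

theorem pv_filter_discard {α : Type} [BEq α] [LawfulBEq α] (p : α → Bool) (s : PySem.Set α) (x : α) :
    List.filter p (PySem.Set.discard s x) = PySem.Set.discard (List.filter p s) x := by
  simp only [PySem.Set.discard, List.filter_filter]
  exact List.filter_congr (fun y _ => Bool.and_comm _ _)

theorem pv_filter_ofList {α : Type} [BEq α] [LawfulBEq α] (p : α → Bool) (xs : List α) :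
    List.filter p (PySem.Set.ofList xs) = PySem.Set.ofList (List.filter p xs) := by
  induction xs with
  | nil => rfl
  | cons x xs ih =>
    rw [PySem.Set.ofList_cons]
    cases hp : p x with
    | true =>
      rw [List.filter_cons_of_pos hp, pv_filter_discard, ih,
        List.filter_cons_of_pos hp, PySem.Set.ofList_cons]
    | false =>
      rw [List.filter_cons_of_neg (by simp [hp]), pv_filter_discard, ih,
        List.filter_cons_of_neg (by simp [hp])]
      apply pv_discard_of_not_mem
      intro hmem
      have := (PySem.Set.mem_ofList _ _).mp hmem
      have := List.of_mem_filter this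
      simp [hp] at this

theorem pv_ofList_map_inj {α β : Type} [BEq α] [LawfulBEq α] [BEq β] [LawfulBEq β]
    (f : α → β) (hf : Function.Injective f) (l : List α) :
    PySem.Set.ofList (l.map f) = (PySem.Set.ofList l).map f := by
  induction l with
  | nil => rfl
  | cons x xs ih =>
    rw [List.map_cons, PySem.Set.ofList_cons, PySem.Set.ofList_cons, ih, List.map_cons]
    congr 1
    simp only [PySem.Set.discard, List.filter_map]
    congr 1
    apply List.filter_congr
    intro y _
    simp [hf.eq_iff]

theorem pv_succ_get? (l : List (String × List (String × String × Int))) (k : String) :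
    (PySem.Dict.mk (l.map (fun p => (p.1, pvSucc p.1 p.2)))).get? k
      = Option.map (pvSucc k) ((PySem.Dict.mk l).get? k) := by
  induction l with
  | nil => rfl
  | cons p l ih =>
    rw [List.map_cons, PySem.Dict.get?_mk_cons, PySem.Dict.get?_mk_cons]
    cases hk : (p.1 == k) with
    | true =>
      have : p.1 = k := by simpa using hk
      simp [this]
    | false => simpa [hk] using ih

-- core counting fact: A's scan over the distinct keys of dic[b] counts exactly the
-- elements of (succ[b] \ {b}) satisfying P
theorem pv_core (P : String → Bool) (a b : String) (hba : ¬ b = a)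
    (es : List (String × String × Int)) :
    List.countP (fun cd : String × String =>
        decide (b = cd.1) && !decide (cd.1 = cd.2) && !decide (cd.1 = a) && P cd.2)
      (pvEdgeKeys es)
    = List.countP P (PySem.Set.diff (pvSucc b es) [b]) := by
  unfold pvEdgeKeys pvSucc
  simp only [PySem.Set.diff]
  rw [List.countP_eq_length_filter, List.countP_eq_length_filter]
  rw [pv_filter_ofList, pv_filter_ofList, pv_filter_ofList]
  have hfL : List.filter (fun cd : String × String => decide (b = cd.1) && !decide (cd.1 = cd.2) && !decide (cd.1 = a) && P cd.2) (List.map (fun e : String × String × Int => (e.1, e.2.1)) es)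
      = List.map (fun e : String × String × Int => (e.1, e.2.1)) (List.filter (fun e : String × String × Int => e.1 == b && !(e.2.1 == b) && P e.2.1) es) := by
    rw [List.filter_map]
    congr 1
    apply List.filter_congr
    intro e _
    by_cases h1 : e.1 = b
    · by_cases h2 : e.2.1 = b
      · simp [Function.comp, h1, h2]
      · simp [Function.comp, h1, h2, hba, Ne.symm h2]
    · simp [Function.comp, h1, Ne.symm h1]
  have hfR : List.filter P (List.filter (fun x => !PySem.Set.contains [b] x) (List.map (fun e : String × String × Int => e.2.1) (List.filter (fun e : String × String × Int => e.1 == b) es)))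
      = List.map (fun e : String × String × Int => e.2.1) (List.filter (fun e : String × String × Int => e.1 == b && !(e.2.1 == b) && P e.2.1) es) := by
    simp only [List.filter_filter, List.filter_map, List.filter_filter]
    congr 1
    apply List.filter_congr
    intro e _
    by_cases h1 : e.1 = b
    · by_cases h2 : e.2.1 = b
      · simp [Function.comp, h1, h2, PySem.Set.contains]
      · cases hP : P e.2.1 <;> simp [Function.comp, h1, h2, hP, PySem.Set.contains]
    · by_cases h2 : e.2.1 = b
      · cases hP : P e.2.1 <;> simp_all [Function.comp]
      · cases hP : P e.2.1 <;> simp_all [Function.comp]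
  rw [hfL, hfR]
  have hmap : List.map (fun e : String × String × Int => (e.1, e.2.1)) (List.filter (fun e : String × String × Int => e.1 == b && !(e.2.1 == b) && P e.2.1) es)
      = List.map (Prod.mk b) (List.map (fun e : String × String × Int => e.2.1) (List.filter (fun e : String × String × Int => e.1 == b && !(e.2.1 == b) && P e.2.1) es)) := by
    rw [List.map_map]
    apply List.map_congr_left
    intro e he
    have h := List.of_mem_filter he
    simp only [Bool.and_assoc, Bool.and_eq_true, beq_iff_eq] at h
    simp [Function.comp, h.1]
  rw [hmap, pv_ofList_map_inj (Prod.mk b) (fun x y h => by simpa using h), List.length_map]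

-- per-edge agreement: A's inner scan over dic[b] equals B's intersection count
theorem pv_edge (d : PySem.Dict String (List (String × String × Int))) (a b : String)
    (hab : ¬ a = b) (acc : Int) :
    (pvEdgeKeys (d.getD b [])).foldl (fun contador cd =>
        if b ≠ cd.1 ∨ cd.1 = cd.2 ∨ cd.1 = a then contador
        else if (d.getD a []).any (fun e => e.1 == a && e.2.1 == cd.2) then contador + 1
        else contador) acc
    = (let sb := PySem.Set.diff ((PySem.Dict.mk (d.items.map (fun p => (p.1, pvSucc p.1 p.2)))).getD b []) [b]
       if sb.isEmpty then acc
       else acc + PySem.Set.len (PySem.Set.inter sb ((PySem.Dict.mk (d.items.map (fun p => (p.1, pvSucc p.1 p.2)))).getD a []))) := by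
  have hsucc : ∀ k, (PySem.Dict.mk (d.items.map (fun p => (p.1, pvSucc p.1 p.2)))).getD k []
      = (match d.get? k with | some es => pvSucc k es | none => []) := by
    intro k
    rw [PySem.Dict.getD_eq_get?_getD, pv_succ_get?]
    cases d.get? k <;> rfl
  have hPA : ∀ y, ((d.getD a []).any (fun e => e.1 == a && e.2.1 == y))
      = ((PySem.Dict.mk (d.items.map (fun p => (p.1, pvSucc p.1 p.2)))).getD a []).contains y := by
    intro y
    rw [hsucc a, PySem.Dict.getD_eq_get?_getD]
    cases hga : d.get? a with
    | none => simp
    | some esa =>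
      simp only [Option.getD_some]
      apply Bool.eq_iff_iff.mpr
      simp only [List.contains_iff_mem, pvSucc, PySem.Set.mem_ofList, List.mem_map, List.mem_filter,
        List.any_eq_true, Bool.and_eq_true, beq_iff_eq]
      constructor
      · rintro ⟨e, he, h1, h2⟩
        exact ⟨e, ⟨he, h1⟩, h2⟩
      · rintro ⟨e, ⟨he, h1⟩, h2⟩
        exact ⟨e, he, h1, h2⟩
  -- A's inner loop as a count
  have hstep : (pvEdgeKeys (d.getD b [])).foldl (fun contador cd =>
        if b ≠ cd.1 ∨ cd.1 = cd.2 ∨ cd.1 = a then contador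
        else if (d.getD a []).any (fun e => e.1 == a && e.2.1 == cd.2) then contador + 1
        else contador) acc
      = acc + (List.countP (fun cd : String × String =>
          decide (b = cd.1) && !decide (cd.1 = cd.2) && !decide (cd.1 = a)
            && ((PySem.Dict.mk (d.items.map (fun p => (p.1, pvSucc p.1 p.2)))).getD a []).contains cd.2)
          (pvEdgeKeys (d.getD b [])) : Int) := by
    rw [← PySem.List.foldl_count_if]
    apply PySem.List.foldl_congr_mem'
    intro cd _ c
    rw [← hPA]
    by_cases h1 : b = cd.1 <;> by_cases h2 : cd.1 = cd.2 <;> by_cases h3 : cd.1 = a <;>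
      cases hA : (d.getD a []).any (fun e => e.1 == a && e.2.1 == cd.2) <;>
        simp_all
  rw [hstep, hsucc b]
  cases hgb : d.get? b with
  | none =>
    have hdb : d.getD b [] = [] := by rw [PySem.Dict.getD_eq_get?_getD, hgb]; rfl
    rw [hdb]
    simp [pvEdgeKeys, PySem.Set.ofList, PySem.Set.diff]
  | some esb =>
    have hdb : d.getD b [] = esb := by rw [PySem.Dict.getD_eq_get?_getD, hgb]; rfl
    rw [hdb]
    rw [pv_core _ a b (fun h => hab h.symm) esb]
    by_cases hE : (PySem.Set.diff (pvSucc b esb) [b]).isEmpty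
    · have hnil : PySem.Set.diff (pvSucc b esb) [b] = [] := List.isEmpty_iff.mp hE
      simp [hnil]
    · simp only [hE, Bool.false_eq_true, not_false_eq_true, if_neg]
      congr 1
      rw [PySem.Set.len, PySem.Set.inter, List.countP_eq_length_filter]
      rfl

theorem pv_main (dic : List (String × List (String × String × Int))) :
    contarFFL dic = contarFFL_alt dic := by
  unfold contarFFL contarFFL_alt
  have hnd : (PySem.Dict.ofList dic).keys.Nodup := PySem.Dict.nodup_keys_ofList dic
  show ((PySem.Dict.ofList dic).keys.foldl _ 0) = ((PySem.Dict.ofList dic).values.foldl _ 0)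
  rw [PySem.Dict.keys, PySem.Dict.values, List.foldl_map, List.foldl_map]
  apply PySem.List.foldl_congr_mem'
  intro p hp acc
  have hget : (PySem.Dict.ofList dic).getD p.1 [] = p.2 :=
    PySem.Dict.getD_of_mem_items (PySem.Dict.ofList dic) (by exact hp) hnd []
  rw [hget]
  apply PySem.List.foldl_congr_mem'
  intro ab _ acc
  by_cases h : ab.1 = ab.2
  · simp [h]
  · simp only [if_neg h]
    exact pv_edge (PySem.Dict.ofList dic) ab.1 ab.2 h acc

-- ===== VERDICT (by name: the statement is the Claim_ definition above) =====
theorem contarFFL_spec : Claim_equal_contarFFL := by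
  intro dic _ _
  unfold Spec_contarFFL
  exact pv_main dic
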